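-- pv_equiv track=rewrite | github.com/ollawone/KGen | kb_linker/linker.py | __associate_verbs_to_entities
-- ===== SOURCE A (Python) =====
-- def __associate_verbs_to_entities(verbs, links):
--     verbs_list = list(verbs)
--
--     verbs_entities = {}
--     for verb in verbs_list:
--         for key in links:
--             if verb.lower() in key.lower():
--                 verbs_entities[verb.lower()] = links[key]
--                 break
--
--     for verb in verbs_list:
--         if not verb.lower() in verbs_entities.keys():
--             verbs_entities[verb.lower()] = 'notfound:' + verb.lower()
--
--     return verbs_entities
-- ===== SOURCE B (Python) =====
-- def __associate_verbs_to_entities(verbs, links):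
--     # Transposed traversal: one pass over the LINKS (each key lowered once), assigning every
--     # still-unmatched target verb it contains; then emit in verb order, matched first.
--     targets = {verb.lower() for verb in verbs}
--     match = {}
--     for key, value in links.items():
--         lk = key.lower()
--         for v in targets:
--             if v not in match and v in lk:
--                 match[v] = value
--     out = {v: match[v] for v in (verb.lower() for verb in verbs) if v in match}
--     for verb in verbs:
--         out.setdefault(verb.lower(), 'notfound:' + verb.lower())
--     return out
-- ===== Notes on version B (the rewrite author's own statement) =====
-- stated objective: alternative
-- what changed: B transposes the loop nest: one pass over the links (each key lowered once) assigns every still-unmatched lowered verb contained in that key, then the result dict is emitted in verb order via a comprehension over the matched verbs plus setdefault for the missing ones, instead of A's verb-outer scans that re-lowercase every key for every verb in two full passes.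
import Mathlib
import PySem

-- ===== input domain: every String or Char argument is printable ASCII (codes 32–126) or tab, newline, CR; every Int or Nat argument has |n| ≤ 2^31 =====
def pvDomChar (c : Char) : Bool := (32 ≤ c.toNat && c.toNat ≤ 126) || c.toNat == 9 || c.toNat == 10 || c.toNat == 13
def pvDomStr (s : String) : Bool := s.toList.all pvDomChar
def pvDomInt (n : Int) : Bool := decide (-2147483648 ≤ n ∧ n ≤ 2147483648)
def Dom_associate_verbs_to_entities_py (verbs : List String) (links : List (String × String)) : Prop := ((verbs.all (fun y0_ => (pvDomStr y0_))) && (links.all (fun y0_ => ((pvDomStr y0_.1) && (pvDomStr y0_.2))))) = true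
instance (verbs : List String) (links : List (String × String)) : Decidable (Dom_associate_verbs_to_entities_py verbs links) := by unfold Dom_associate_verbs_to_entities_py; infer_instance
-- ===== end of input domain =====

-- B transposes the loop nest: one pass over the links (each key lowered once) assigns every
-- still-unmatched lowered verb it contains, then the dict is emitted in verb order via a
-- comprehension plus setdefault, instead of A's verb-outer scans (objective: alternative).


-- ===== PORT A =====
-- inner loop of A's first pass: 'for key in links: if verb.lower() in key.lower():
-- verbs_entities[verb.lower()] = links[key]; break' — returns the value to insert (none = no break)
def pvAInner (d : PySem.Dict String String) (v : String) : List String → Option String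
  | [] => none
  | key :: rest =>
    if PySem.Str.isIn v (PySem.Str.lower key) then d.get? key else pvAInner d v rest

def associate_verbs_to_entities_py (verbs : List String) (links : List (String × String)) : List (String × String) :=
  let d : PySem.Dict String String := ⟨links⟩
  let ve1 := verbs.foldl (fun ve verb =>
      match pvAInner d (PySem.Str.lower verb) d.keys with
      | some val => ve.insert (PySem.Str.lower verb) val
      | none => ve) PySem.Dict.empty
  let ve2 := verbs.foldl (fun ve verb =>
      if ve.keys.contains (PySem.Str.lower verb) then ve
      else ve.insert (PySem.Str.lower verb) ("notfound:" ++ PySem.Str.lower verb)) ve1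
  ve2.items

-- ===== PORT B =====
def associate_verbs_to_entities_py_alt (verbs : List String) (links : List (String × String)) : List (String × String) :=
  -- targets = {verb.lower() for verb in verbs}
  let targets : PySem.Set String := PySem.Set.ofList (verbs.map PySem.Str.lower)
  -- for key, value in links.items(): lk = key.lower(); for v in targets: if v not in match and v in lk: match[v] = value
  let m := links.foldl (fun (m : PySem.Dict String String) kv =>
      targets.foldl (fun (m : PySem.Dict String String) v =>
        if (!m.contains v && PySem.Str.isIn v (PySem.Str.lower kv.1)) then m.insert v kv.2 else m) m)
    PySem.Dict.empty
  -- out = {v: match[v] for v in (verb.lower() for verb in verbs) if v in match}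
  let out := verbs.foldl (fun (out : PySem.Dict String String) verb =>
      match m.get? (PySem.Str.lower verb) with
      | some val => out.insert (PySem.Str.lower verb) val
      | none => out) PySem.Dict.empty
  -- for verb in verbs: out.setdefault(verb.lower(), 'notfound:' + verb.lower())
  let out2 := verbs.foldl (fun (out : PySem.Dict String String) verb =>
      out.setdefault (PySem.Str.lower verb) ("notfound:" ++ PySem.Str.lower verb)) out
  out2.items

-- ===== PRECONDITION & SPEC =====
def Spec_associate_verbs_to_entities_py (verbs : List String) (links : List (String × String)) (out : List (String × String)) : Prop := out = associate_verbs_to_entities_py_alt verbs links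
instance (verbs : List String) (links : List (String × String)) (out : List (String × String)) : Decidable (Spec_associate_verbs_to_entities_py verbs links out) := by unfold Spec_associate_verbs_to_entities_py; infer_instance

-- ===== CLAIM (what is proved, stated in full; the proofs are below) =====
def Claim_equal_associate_verbs_to_entities_py : Prop := ∀ (verbs : List String) (links : List (String × String)), Dom_associate_verbs_to_entities_py verbs links → Spec_associate_verbs_to_entities_py verbs links (associate_verbs_to_entities_py verbs links)

-- ===== LEMMAS AND PROOFS =====

-- the common characterization of both matching strategies: value of the first link whose lowered key contains v
def pvM (links : List (String × String)) (v : String) : Option String :=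
  (links.find? (fun p => PySem.Str.isIn v (PySem.Str.lower p.1))).map (·.2)

-- canonical "found" list: distinct lowered verbs (first occurrences) that match, with their values
def pvCF (links : List (String × String)) : List String → List String → List (String × String)
  | [], _ => []
  | verb :: rest, sf =>
    match pvM links (PySem.Str.lower verb) with
    | some val =>
      if PySem.Str.lower verb ∈ sf then pvCF links rest sf
      else (PySem.Str.lower verb, val) :: pvCF links rest (PySem.Str.lower verb :: sf)
    | none => pvCF links rest sf

-- canonical "missing" list: distinct lowered verbs (first occurrences) with no match
def pvCM (links : List (String × String)) : List String → List String → List (String × String)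
  | [], _ => []
  | verb :: rest, sm =>
    match pvM links (PySem.Str.lower verb) with
    | some _ => pvCM links rest sm
    | none =>
      if PySem.Str.lower verb ∈ sm then pvCM links rest sm
      else (PySem.Str.lower verb, "notfound:" ++ PySem.Str.lower verb) :: pvCM links rest (PySem.Str.lower verb :: sm)

lemma pv_find_mk_get? (P : String → Bool) :
    ∀ (l : List (String × String)) (k : String) (w : String),
      l.find? (fun p => P p.1) = some (k, w) →
      (PySem.Dict.mk l).get? k = some w := by
  intro l
  induction l with
  | nil => intro k w h; simp at h
  | cons a t ih =>
    intro k w h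
    by_cases hp : P a.1
    · rw [List.find?_cons_of_pos (by simpa using hp)] at h
      have ha : a = (k, w) := by injection h
      subst ha
      rw [PySem.Dict.get?_mk_cons]
      simp
    · rw [List.find?_cons_of_neg (by simpa using hp)] at h
      have hk : P k := by
        have := List.find?_some h
        simpa using this
      have hne : a.1 ≠ k := fun he => hp (he ▸ hk)
      rw [show a = (a.1, a.2) from rfl, PySem.Dict.get?_mk_cons]
      simp [hne]
      exact ih k w h

lemma pvAInner_keys (d : PySem.Dict String String) (v : String) :
    ∀ (l : List (String × String)),
      pvAInner d v (l.map (·.1)) =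
        match l.find? (fun p => PySem.Str.isIn v (PySem.Str.lower p.1)) with
        | some p => d.get? p.1
        | none => none := by
  intro l
  induction l with
  | nil => rfl
  | cons a t ih =>
    rw [List.map_cons]
    by_cases hp : PySem.Str.isIn v (PySem.Str.lower a.1)
    · rw [List.find?_cons_of_pos (by simpa using hp)]
      simp only [pvAInner]
      rw [if_pos hp]
    · rw [List.find?_cons_of_neg (by simpa using hp)]
      simp only [pvAInner]
      rw [if_neg hp]
      exact ih

lemma pvAInner_eq (links : List (String × String)) (v : String) :
    pvAInner (PySem.Dict.mk links) v (PySem.Dict.mk links).keys = pvM links v := by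
  have hkeys : (PySem.Dict.mk links).keys = links.map (·.1) := rfl
  rw [hkeys, pvAInner_keys]
  unfold pvM
  cases hf : links.find? (fun p => PySem.Str.isIn v (PySem.Str.lower p.1)) with
  | none => simp
  | some p =>
    have := pv_find_mk_get? (fun k => PySem.Str.isIn v (PySem.Str.lower k)) links p.1 p.2
      (by simpa using hf)
    simp [this]

-- B's inner loop over the targets: lookup after assigning everything the key contains
lemma pvBInner_get? (lk : String) (val : String) :
    ∀ (T : List String) (m : PySem.Dict String String) (x : String),
      (T.foldl (fun (m : PySem.Dict String String) v =>
          if (!m.contains v && PySem.Str.isIn v lk) then m.insert v val else m) m).get? x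
        = if x ∈ T ∧ m.contains x = false ∧ PySem.Str.isIn x lk then some val else m.get? x := by
  intro T
  induction T with
  | nil => intro m x; simp
  | cons v rest ih =>
    intro m x
    rw [List.foldl_cons]
    by_cases hfire : (!m.contains v && PySem.Str.isIn v lk) = true
    · rw [if_pos hfire]
      obtain ⟨hcv, hiv⟩ : m.contains v = false ∧ PySem.Str.isIn v lk = true := by
        constructor
        · cases hmc : m.contains v with
          | false => rfl
          | true => rw [hmc] at hfire; simp at hfire
        · exact (Bool.and_eq_true_iff.mp hfire).2
      rw [ih]
      by_cases hx : x = v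
      · subst hx
        rw [if_neg (by rintro ⟨_, hc, _⟩; rw [PySem.Dict.contains_insert_self] at hc; exact absurd hc (by simp))]
        rw [PySem.Dict.get?_insert_self]
        rw [if_pos ⟨by simp, hcv, hiv⟩]
      · rw [PySem.Dict.get?_insert_of_ne m val hx]
        have hci : (m.insert v val).contains x = m.contains x := by
          rw [PySem.Dict.contains_insert]
          simp [hx]
        rw [hci]
        by_cases hxr : x ∈ rest
        · simp [hxr, hx]
        · simp [hxr, hx]
    · rw [if_neg hfire, ih]
      by_cases hx : x = v
      · subst hx
        have hnc : ¬ (m.contains x = false ∧ PySem.Str.isIn x lk = true) := by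
          rintro ⟨hc, hi⟩
          exact hfire (by rw [hc]; simpa using hi)
        by_cases hxr : x ∈ rest
        · simp [hxr]
        · rw [if_neg (by rintro ⟨_, h2, h3⟩; exact hnc ⟨h2, h3⟩),
              if_neg (by rintro ⟨_, h2, h3⟩; exact hnc ⟨h2, h3⟩)]
      · simp [hx]

-- B's outer pass over the links: for a target verb the lookup is the first-match value pvM
lemma pvBOuter_get? :
    ∀ (links : List (String × String)) (T : List String) (m : PySem.Dict String String) (x : String),
      x ∈ T →
      (links.foldl (fun (m : PySem.Dict String String) kv =>
          T.foldl (fun (m : PySem.Dict String String) v =>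
            if (!m.contains v && PySem.Str.isIn v (PySem.Str.lower kv.1)) then m.insert v kv.2 else m) m) m).get? x
        = match m.get? x with
          | some w => some w
          | none => pvM links x := by
  intro links
  induction links with
  | nil =>
    intro T m x _
    cases h : m.get? x <;> simp [pvM, h]
  | cons kv rest ih =>
    intro T m x hxT
    rw [List.foldl_cons]
    rw [ih T _ x hxT, pvBInner_get? (PySem.Str.lower kv.1) kv.2 T m x]
    cases hg : m.get? x with
    | some w =>
      have hc : m.contains x = true := by
        rw [PySem.Dict.contains_eq_isSome_get?, hg]; rfl
      rw [if_neg (by rintro ⟨_, h2, _⟩; rw [hc] at h2; exact absurd h2 (by simp))]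
    | none =>
      have hc : m.contains x = false := by
        rw [PySem.Dict.contains_eq_isSome_get?, hg]; rfl
      by_cases hi : PySem.Str.isIn x (PySem.Str.lower kv.1) = true
      · rw [if_pos ⟨hxT, hc, hi⟩]
        simp only [pvM]
        rw [show kv = (kv.1, kv.2) from rfl, List.find?_cons_of_pos (by simpa using hi)]
        rfl
      · rw [if_neg (by rintro ⟨_, _, h3⟩; exact hi h3)]
        show pvM rest x = pvM (kv :: rest) x
        simp only [pvM]
        rw [List.find?_cons_of_neg (by simpa using hi)]

lemma pvCF_congr (links : List (String × String)) :
    ∀ (verbs : List String) (sf sf' : List String),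
      (∀ x, x ∈ sf ↔ x ∈ sf') → pvCF links verbs sf = pvCF links verbs sf' := by
  intro verbs
  induction verbs with
  | nil => intro sf sf' _; rfl
  | cons verb rest ih =>
    intro sf sf' h
    cases hm : pvM links (PySem.Str.lower verb) with
    | none => simp [pvCF, hm]; exact ih sf sf' h
    | some val =>
      by_cases hin : PySem.Str.lower verb ∈ sf
      · simp [pvCF, hm, hin, (h _).mp hin]
        exact ih sf sf' h
      · have hin' : PySem.Str.lower verb ∉ sf' := fun hc => hin ((h _).mpr hc)
        simp [pvCF, hm, hin, hin']
        exact ih _ _ (by intro x; simp [h x])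

lemma pvCF_mem (links : List (String × String)) :
    ∀ (verbs : List String) (sf : List String) (p : String × String),
      p ∈ pvCF links verbs sf → pvM links p.1 = some p.2 := by
  intro verbs
  induction verbs with
  | nil => intro sf p h; simp [pvCF] at h
  | cons verb rest ih =>
    intro sf p h
    cases hm : pvM links (PySem.Str.lower verb) with
    | none => simp only [pvCF, hm] at h; exact ih sf p h
    | some val =>
      simp only [pvCF, hm] at h
      by_cases hin : PySem.Str.lower verb ∈ sf
      · rw [if_pos hin] at h; exact ih sf p h
      · rw [if_neg hin] at h
        rcases List.mem_cons.mp h with h | h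
        · subst h; simpa using hm
        · exact ih _ p h

lemma pvCF_complete (links : List (String × String)) :
    ∀ (verbs : List String) (sf : List String) (verb : String),
      verb ∈ verbs → (pvM links (PySem.Str.lower verb)).isSome →
      PySem.Str.lower verb ∈ sf ∨ PySem.Str.lower verb ∈ (pvCF links verbs sf).map (·.1) := by
  intro verbs
  induction verbs with
  | nil => intro sf verb h; simp at h
  | cons verb0 rest ih =>
    intro sf verb hmem hsome
    cases hm0 : pvM links (PySem.Str.lower verb0) with
    | none =>
      simp only [pvCF, hm0]
      rcases List.mem_cons.mp hmem with rfl | hmem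
      · rw [hm0] at hsome; simp at hsome
      · exact ih sf verb hmem hsome
    | some val0 =>
      simp only [pvCF, hm0]
      by_cases hin : PySem.Str.lower verb0 ∈ sf
      · rw [if_pos hin]
        rcases List.mem_cons.mp hmem with rfl | hmem
        · exact Or.inl hin
        · exact ih sf verb hmem hsome
      · rw [if_neg hin]
        rcases List.mem_cons.mp hmem with rfl | hmem
        · right; simp
        · rcases ih (PySem.Str.lower verb0 :: sf) verb hmem hsome with h | h
          · rcases List.mem_cons.mp h with he | h
            · right; simp [he]
            · exact Or.inl h
          · right; simp only [List.map_cons]; exact List.mem_cons_of_mem _ h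

-- A's first pass (and B's comprehension pass) appends exactly the canonical found list
lemma pv_pass1 (links : List (String × String)) :
    ∀ (verbs : List String) (ve : PySem.Dict String String),
      (∀ p ∈ ve.items, pvM links p.1 = some p.2) →
      (verbs.foldl (fun ve verb =>
          match pvM links (PySem.Str.lower verb) with
          | some val => ve.insert (PySem.Str.lower verb) val
          | none => ve) ve).items = ve.items ++ pvCF links verbs ve.keys := by
  intro verbs
  induction verbs with
  | nil => intro ve _; simp [pvCF]
  | cons verb rest ih =>
    intro ve hinv
    rw [List.foldl_cons]
    cases hm : pvM links (PySem.Str.lower verb) with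
    | none => simp only [pvCF, hm]; exact ih ve hinv
    | some val =>
      simp only []
      cases hc : ve.contains (PySem.Str.lower verb) with
      | true =>
        have hmemk : PySem.Str.lower verb ∈ ve.keys :=
          (PySem.Dict.contains_iff_mem_keys ve _).mp hc
        have hid : ve.insert (PySem.Str.lower verb) val = ve := by
          apply PySem.Dict.ext
          rw [PySem.Dict.items_insert_of_contains ve val hc]
          have : ∀ p ∈ ve.items,
              (if (p.1 == PySem.Str.lower verb) = true then (PySem.Str.lower verb, val) else p) = id p := by
            intro p hp
            by_cases he : p.1 = PySem.Str.lower verb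
            · have := hinv p hp
              rw [he, hm] at this
              have hv : val = p.2 := by injection this
              rw [if_pos (by simp [he]), id_eq, hv, ← he]
            · simp [he]
          rw [List.map_congr_left this, List.map_id]
        rw [hid]; simp only [pvCF, hm, if_pos hmemk]
        exact ih ve hinv
      | false =>
        have hnotk : PySem.Str.lower verb ∉ ve.keys := by
          intro hmemk
          rw [(PySem.Dict.contains_iff_mem_keys ve _).mpr hmemk] at hc
          exact absurd hc (by simp)
        have hitems : (ve.insert (PySem.Str.lower verb) val).items
            = ve.items ++ [(PySem.Str.lower verb, val)] :=
          PySem.Dict.items_insert_of_not_contains ve val hc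
        have hkeys : (ve.insert (PySem.Str.lower verb) val).keys
            = ve.keys ++ [PySem.Str.lower verb] := by
          show ((ve.insert (PySem.Str.lower verb) val).items).map (·.1)
              = (ve.items).map (·.1) ++ [PySem.Str.lower verb]
          rw [hitems]; simp
        have hinv' : ∀ p ∈ (ve.insert (PySem.Str.lower verb) val).items,
            pvM links p.1 = some p.2 := by
          intro p hp
          rw [hitems] at hp
          rcases List.mem_append.mp hp with hp | hp
          · exact hinv p hp
          · simp at hp; subst hp; simpa using hm
        rw [ih _ hinv', hitems, hkeys]; simp only [pvCF, hm, if_neg hnotk]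
        rw [pvCF_congr links rest (ve.keys ++ [PySem.Str.lower verb])
            (PySem.Str.lower verb :: ve.keys) (by intro x; simp [or_comm])]
        simp

-- the shared second pass appends exactly the canonical missing list
lemma pv_pass2 (links : List (String × String)) :
    ∀ (verbs : List String) (ve : PySem.Dict String String) (sm : List String),
      (∀ verb ∈ verbs, (pvM links (PySem.Str.lower verb)).isSome → PySem.Str.lower verb ∈ ve.keys) →
      (∀ x, pvM links x = none → (x ∈ ve.keys ↔ x ∈ sm)) →
      (verbs.foldl (fun ve verb =>
          if ve.keys.contains (PySem.Str.lower verb) then ve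
          else ve.insert (PySem.Str.lower verb) ("notfound:" ++ PySem.Str.lower verb)) ve).items
        = ve.items ++ pvCM links verbs sm := by
  intro verbs
  induction verbs with
  | nil => intro ve sm _ _; simp [pvCM]
  | cons verb rest ih =>
    intro ve sm h1 h2
    rw [List.foldl_cons]
    cases hm : pvM links (PySem.Str.lower verb) with
    | some val =>
      have hmemk : PySem.Str.lower verb ∈ ve.keys :=
        h1 verb (by simp) (by simp [hm])
      rw [if_pos (by simpa using hmemk)]; simp only [pvCM, hm]
      exact ih ve sm (fun v hv => h1 v (List.mem_cons_of_mem _ hv)) h2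
    | none =>
      by_cases hin : PySem.Str.lower verb ∈ ve.keys
      · rw [if_pos (by simpa using hin)]; simp only [pvCM, hm, if_pos ((h2 _ hm).mp hin)]
        exact ih ve sm (fun v hv => h1 v (List.mem_cons_of_mem _ hv)) h2
      · have hsm : PySem.Str.lower verb ∉ sm := fun hc => hin ((h2 _ hm).mpr hc)
        rw [if_neg (by simpa using hin)]
        have hc : ve.contains (PySem.Str.lower verb) = false := by
          cases hcc : ve.contains (PySem.Str.lower verb) with
          | false => rfl
          | true => exact absurd ((PySem.Dict.contains_iff_mem_keys ve _).mp hcc) hin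
        have hitems : (ve.insert (PySem.Str.lower verb) ("notfound:" ++ PySem.Str.lower verb)).items
            = ve.items ++ [(PySem.Str.lower verb, "notfound:" ++ PySem.Str.lower verb)] :=
          PySem.Dict.items_insert_of_not_contains ve _ hc
        have hkeys : (ve.insert (PySem.Str.lower verb) ("notfound:" ++ PySem.Str.lower verb)).keys
            = ve.keys ++ [PySem.Str.lower verb] := by
          show ((ve.insert (PySem.Str.lower verb) _).items).map (·.1)
              = (ve.items).map (·.1) ++ [PySem.Str.lower verb]
          rw [hitems]; simp
        have h1' : ∀ v ∈ rest, (pvM links (PySem.Str.lower v)).isSome →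
            PySem.Str.lower v ∈ (ve.insert (PySem.Str.lower verb) ("notfound:" ++ PySem.Str.lower verb)).keys := by
          intro v hv hs
          rw [hkeys]
          exact List.mem_append_left _ (h1 v (List.mem_cons_of_mem _ hv) hs)
        have h2' : ∀ x, pvM links x = none →
            (x ∈ (ve.insert (PySem.Str.lower verb) ("notfound:" ++ PySem.Str.lower verb)).keys
              ↔ x ∈ PySem.Str.lower verb :: sm) := by
          intro x hx
          rw [hkeys]
          simp [h2 x hx, or_comm]
        rw [ih _ _ h1' h2', hitems]; simp only [pvCM, hm, if_neg hsm]
        simp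

-- the common tail: from a dict whose items are the canonical found list, the missing pass
-- produces the canonical found ++ missing lists
lemma pv_tail (links : List (String × String)) (verbs : List String)
    (d : PySem.Dict String String) (hd : d.items = pvCF links verbs []) :
    (verbs.foldl (fun ve verb =>
        if ve.keys.contains (PySem.Str.lower verb) then ve
        else ve.insert (PySem.Str.lower verb) ("notfound:" ++ PySem.Str.lower verb)) d).items
      = pvCF links verbs [] ++ pvCM links verbs [] := by
  have hkeys : d.keys = (pvCF links verbs []).map (·.1) := by
    show d.items.map (·.1) = _
    rw [hd]
  have h1 : ∀ verb ∈ verbs, (pvM links (PySem.Str.lower verb)).isSome →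
      PySem.Str.lower verb ∈ d.keys := by
    intro verb hv hs
    rcases pvCF_complete links verbs [] verb hv hs with h | h
    · simp at h
    · rw [hkeys]; exact h
  have h2 : ∀ x, pvM links x = none → (x ∈ d.keys ↔ x ∈ ([] : List String)) := by
    intro x hx
    constructor
    · intro hmem
      rw [hkeys] at hmem
      obtain ⟨p, hp, hpe⟩ := List.mem_map.mp hmem
      have := pvCF_mem links verbs [] p hp
      rw [hpe, hx] at this
      simp at this
    · intro h; simp at h
  rw [pv_pass2 links verbs d [] h1 h2, hd]

lemma pv_A_eq (verbs : List String) (links : List (String × String)) :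
    associate_verbs_to_entities_py verbs links
      = pvCF links verbs [] ++ pvCM links verbs [] := by
  unfold associate_verbs_to_entities_py
  simp only []
  have hstep1 : (fun (ve : PySem.Dict String String) (verb : String) =>
      match pvAInner (PySem.Dict.mk links) (PySem.Str.lower verb) (PySem.Dict.mk links).keys with
      | some val => ve.insert (PySem.Str.lower verb) val
      | none => ve)
      = (fun (ve : PySem.Dict String String) (verb : String) =>
        match pvM links (PySem.Str.lower verb) with
        | some val => ve.insert (PySem.Str.lower verb) val
        | none => ve) := by
    funext ve verb; rw [pvAInner_eq]
  rw [hstep1]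
  apply pv_tail
  rw [pv_pass1 links verbs PySem.Dict.empty (by intro p hp; simp [PySem.Dict.empty] at hp)]
  simp [PySem.Dict.empty, PySem.Dict.keys]

lemma pv_B_eq (verbs : List String) (links : List (String × String)) :
    associate_verbs_to_entities_py_alt verbs links
      = pvCF links verbs [] ++ pvCM links verbs [] := by
  unfold associate_verbs_to_entities_py_alt
  simp only []
  set T : List String := PySem.Set.ofList (verbs.map PySem.Str.lower) with hT
  set m := links.foldl (fun (m : PySem.Dict String String) kv =>
      T.foldl (fun (m : PySem.Dict String String) v =>
        if (!m.contains v && PySem.Str.isIn v (PySem.Str.lower kv.1)) then m.insert v kv.2 else m) m)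
    PySem.Dict.empty with hm
  -- for every verb of the list, the match-dict lookup is pvM
  have hget : ∀ verb ∈ verbs, m.get? (PySem.Str.lower verb) = pvM links (PySem.Str.lower verb) := by
    intro verb hv
    have hmemT : PySem.Str.lower verb ∈ T := by
      rw [hT, PySem.Set.mem_ofList]
      exact List.mem_map.mpr ⟨verb, hv, rfl⟩
    rw [hm, pvBOuter_get? links T PySem.Dict.empty (PySem.Str.lower verb) hmemT]
    rw [PySem.Dict.get?_empty]
  -- the comprehension pass equals A's first-pass fold, hence produces pvCF
  have hcompr : (verbs.foldl (fun (out : PySem.Dict String String) verb =>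
      match m.get? (PySem.Str.lower verb) with
      | some val => out.insert (PySem.Str.lower verb) val
      | none => out) PySem.Dict.empty)
      = (verbs.foldl (fun (out : PySem.Dict String String) verb =>
        match pvM links (PySem.Str.lower verb) with
        | some val => out.insert (PySem.Str.lower verb) val
        | none => out) PySem.Dict.empty) := by
    apply PySem.List.foldl_congr_mem
    intro acc verb hv
    rw [hget verb hv]
  -- setdefault is exactly the guarded-insert step of pv_pass2
  have hsd : (fun (out : PySem.Dict String String) (verb : String) =>
      out.setdefault (PySem.Str.lower verb) ("notfound:" ++ PySem.Str.lower verb))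
      = (fun (out : PySem.Dict String String) (verb : String) =>
        if out.keys.contains (PySem.Str.lower verb) then out
        else out.insert (PySem.Str.lower verb) ("notfound:" ++ PySem.Str.lower verb)) := by
    funext out verb
    cases hc : out.contains (PySem.Str.lower verb) with
    | true =>
      rw [PySem.Dict.setdefault_of_contains _ _ hc,
          if_pos (by simpa using (PySem.Dict.contains_iff_mem_keys out _).mp hc)]
    | false =>
      rw [PySem.Dict.setdefault_of_not_contains _ _ hc]
      rw [if_neg (by
        intro hmem
        rw [(PySem.Dict.contains_iff_mem_keys out _).mpr (by simpa using hmem)] at hc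
        exact absurd hc (by simp))]
  rw [hcompr, hsd]
  apply pv_tail
  rw [pv_pass1 links verbs PySem.Dict.empty (by intro p hp; simp [PySem.Dict.empty] at hp)]
  simp [PySem.Dict.empty, PySem.Dict.keys]

-- ===== VERDICT (by name: the statement is the Claim_ definition above) =====
theorem associate_verbs_to_entities_py_spec : Claim_equal_associate_verbs_to_entities_py := by
  intro verbs links _
  unfold Spec_associate_verbs_to_entities_py
  rw [pv_A_eq, pv_B_eq]
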